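-- pv_equiv track=rewrite | github.com/boy56/EventTopicAlgo | oldcode/cluster_tool.py | keywords_count
-- ===== SOURCE A (Python) =====
-- def keywords_count(corpus, top_n):
--     key_words = []
--     for index in range(len(corpus)):
--         word_count = {}
--         for word in corpus[index].split(" "):
--             count = word_count.get(word, 0)
--             word_count[word] = count + 1
--         top_words = list(sorted(word_count.items(), key=lambda x: x[1], reverse=True))[:top_n]
--         key_words.append([w[0] for w in top_words])
--     return key_words
-- ===== SOURCE B (Python) =====
-- def keywords_count(corpus, top_n):
--     result = []
--     for doc in corpus:
--         word_count = {}
--         for word in doc.split(" "):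
--             word_count[word] = word_count.get(word, 0) + 1
--         # bucket pass: emit words grouped by frequency, highest frequency first;
--         # within a bucket, dict insertion order gives the stable tie-break
--         counts = sorted(set(word_count.values()), reverse=True)
--         ordered = []
--         for c in counts:
--             for w, k in word_count.items():
--                 if k == c:
--                     ordered.append(w)
--         result.append(ordered[:top_n])
--     return result
-- ===== Notes on version B (the rewrite author's own statement) =====
-- stated objective: alternative
-- what changed: A stably sorts the (word, count) items by count and slices; B never sorts the items: it sorts only the distinct counts descending and emits each count's bucket of words in dict insertion order, which reproduces the stable tie-break.
import Mathlib
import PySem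

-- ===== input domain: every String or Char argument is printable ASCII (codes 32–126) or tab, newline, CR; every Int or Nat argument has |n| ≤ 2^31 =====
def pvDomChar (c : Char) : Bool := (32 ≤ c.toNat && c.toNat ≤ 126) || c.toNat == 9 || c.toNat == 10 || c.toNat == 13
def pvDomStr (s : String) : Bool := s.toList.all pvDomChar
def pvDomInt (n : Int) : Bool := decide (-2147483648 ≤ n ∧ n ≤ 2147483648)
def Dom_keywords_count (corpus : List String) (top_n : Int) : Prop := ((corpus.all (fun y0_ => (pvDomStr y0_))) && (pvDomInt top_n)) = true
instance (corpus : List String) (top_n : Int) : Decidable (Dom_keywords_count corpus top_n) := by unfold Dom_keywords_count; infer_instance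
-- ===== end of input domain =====

-- B replaces A's stable sort of the (word, count) items by a bucket pass: the distinct
-- counts are sorted once, and each bucket is emitted in dict insertion order (objective: alternative).

-- ===== PORT A =====
def keywords_count (corpus : List String) (top_n : Int) : List (List String) :=
  (PySem.List.pyRange 0 (PySem.List.len corpus)).foldl
    (fun key_words index =>
      let word_count :=
        ((PySem.Str.split? (PySem.List.pyGetD corpus index "") " ").getD []).foldl
          (fun d word => d.insert word (d.getD word 0 + 1)) (PySem.Dict.empty : PySem.Dict String Int)
      let top_words :=
        PySem.List.slice (PySem.List.sorted word_count.items (fun x => x.2) true) none (some top_n)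
      key_words ++ [top_words.map (fun w => w.1)])
    []

-- ===== PORT B =====
def keywords_count_alt (corpus : List String) (top_n : Int) : List (List String) :=
  corpus.foldl
    (fun result doc =>
      let word_count :=
        ((PySem.Str.split? doc " ").getD []).foldl
          (fun d word => d.insert word (d.getD word 0 + 1)) (PySem.Dict.empty : PySem.Dict String Int)
      let counts := PySem.List.sorted (PySem.Set.ofList word_count.values) (fun c => c) true
      let ordered := counts.foldl
        (fun acc c =>
          word_count.items.foldl
            (fun acc2 p => if p.2 == c then acc2 ++ [p.1] else acc2) acc)
        []
      result ++ [PySem.List.slice ordered none (some top_n)])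
    []

-- ===== PRECONDITION & SPEC =====
def Spec_keywords_count (corpus : List String) (top_n : Int) (out : List (List String)) : Prop := out = keywords_count_alt corpus top_n
instance (corpus : List String) (top_n : Int) (out : List (List String)) : Decidable (Spec_keywords_count corpus top_n out) := by unfold Spec_keywords_count; infer_instance

-- ===== CLAIM (what is proved, stated in full; the proofs are below) =====
def Claim_equal_keywords_count : Prop := ∀ (corpus : List String) (top_n : Int), Dom_keywords_count corpus top_n → Spec_keywords_count corpus top_n (keywords_count corpus top_n)

-- ===== LEMMAS AND PROOFS =====

-- inserting past a block of elements the comparator does not put x before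
theorem pv_insertBy_append {α : Type} (bef : α → α → Bool) (x : α) (u v : List α)
    (h : ∀ y ∈ u, bef x y = false) :
    PySem.List.insertBy bef x (u ++ v) = u ++ PySem.List.insertBy bef x v := by
  induction u with
  | nil => rfl
  | cons a u ih =>
    have ha : bef x a = false := h a (by simp)
    simp [PySem.List.insertBy, ha, ih (fun y hy => h y (by simp [hy]))]

-- x goes in front of a list it precedes entirely
theorem pv_insertBy_front {α : Type} (bef : α → α → Bool) (x : α) (v : List α)
    (h : ∀ y ∈ v, bef x y = true) :
    PySem.List.insertBy bef x v = x :: v := by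
  cases v with
  | nil => rfl
  | cons a v => simp [PySem.List.insertBy, h a (by simp)]

-- after dropping the prefix ≥ t of a strictly descending list, everything is < t
theorem pv_dropWhile_desc_lt (t : Int) (cs : List Int) (hp : cs.Pairwise (· > ·)) :
    ∀ c ∈ cs.dropWhile (fun c => decide (t ≤ c)), c < t := by
  induction cs with
  | nil => simp
  | cons a cs ih =>
    intro c hc
    by_cases h : t ≤ a
    · rw [List.dropWhile_cons_of_pos (by simpa)] at hc
      exact ih hp.of_cons c hc
    · rw [List.dropWhile_cons_of_neg (by simp; omega)] at hc
      rcases List.mem_cons.mp hc with rfl | hc'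
      · omega
      · have := (List.rel_of_pairwise_cons hp) hc'
        omega

theorem pv_flatMap_congr_mem {α β : Type} (cs : List α) (f g : α → List β)
    (h : ∀ c ∈ cs, f c = g c) : cs.flatMap f = cs.flatMap g := by
  induction cs with
  | nil => rfl
  | cons a cs ih => simp [List.flatMap_cons, h a (by simp), ih (fun c hc => h c (by simp [hc]))]

-- appending x whose count is the last (smallest) element of the descending block u
theorem pv_flatMap_last_bucket (x : String × Int) (l : List (String × Int)) :
    ∀ u : List Int, u.Pairwise (· > ·) → (∀ c ∈ u, x.2 ≤ c) → x.2 ∈ u →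
    u.flatMap (fun c => (l ++ [x]).filter (fun p => p.2 == c)) =
      u.flatMap (fun c => l.filter (fun p => p.2 == c)) ++ [x] := by
  intro u
  induction u with
  | nil => simp
  | cons a u ih =>
    intro hp hge hmem
    by_cases hax : a = x.2
    · subst hax
      have hu : u = [] := by
        by_contra h
        rcases List.exists_mem_of_ne_nil u h with ⟨c, hc⟩
        have h1 := (List.rel_of_pairwise_cons hp) hc
        have h2 := hge c (by simp [hc])
        omega
      subst hu
      simp [List.filter_append]
    · have hx : x.2 ∈ u := by
        rcases List.mem_cons.mp hmem with h | h
        · exact absurd h.symm hax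
        · exact h
      have hne : (x.2 == a) = false := beq_eq_false_iff_ne.mpr (fun h => hax h.symm)
      have hfa : ((List.filter (fun p => p.2 == a) [x]) : List (String × Int)) = [] := by
        simp [hne]
      rw [List.flatMap_cons, List.flatMap_cons,
        ih hp.of_cons (fun c hc => hge c (by simp [hc])) hx, List.filter_append, hfa]
      simp

-- THE CORE: a stable descending sort by count is the concatenation of the count buckets,
-- taken along any strictly descending list of counts covering the list
theorem pv_sorted_eq_buckets (l : List (String × Int)) :
    ∀ cs : List Int, cs.Pairwise (· > ·) → (∀ p ∈ l, p.2 ∈ cs) →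
    PySem.List.sorted l (fun p => p.2) true =
      cs.flatMap (fun c => l.filter (fun p => p.2 == c)) := by
  induction l using List.reverseRecOn with
  | nil =>
    intro cs _ _
    rw [PySem.List.sorted_rev_eq_foldl_insertBy]
    simp
  | append_singleton l x ih =>
    intro cs hcs hmem
    have hx : x.2 ∈ cs := hmem x (by simp)
    have hstep : PySem.List.sorted (l ++ [x]) (fun p => p.2) true =
        PySem.List.insertBy (fun a b => decide (b.2 < a.2)) x
          (PySem.List.sorted l (fun p => p.2) true) := by
      rw [PySem.List.sorted_rev_eq_foldl_insertBy, PySem.List.sorted_rev_eq_foldl_insertBy,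
        List.foldl_append]
      rfl
    rw [hstep, ih cs hcs (fun p hp => hmem p (by simp [hp]))]
    have hsplit : cs = cs.takeWhile (fun c => decide (x.2 ≤ c)) ++
        cs.dropWhile (fun c => decide (x.2 ≤ c)) := (List.takeWhile_append_dropWhile).symm
    set u := cs.takeWhile (fun c => decide (x.2 ≤ c)) with hu_def
    set v := cs.dropWhile (fun c => decide (x.2 ≤ c)) with hv_def
    have hu_ge : ∀ c ∈ u, x.2 ≤ c := by
      intro c hc
      simpa using List.mem_takeWhile_imp hc
    have hv_lt : ∀ c ∈ v, c < x.2 := pv_dropWhile_desc_lt x.2 cs hcs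
    have hu_pair : u.Pairwise (· > ·) := hcs.sublist (List.takeWhile_sublist _)
    have hx_u : x.2 ∈ u := by
      rcases List.mem_append.mp (hsplit ▸ hx) with h | h
      · exact h
      · exact absurd (hv_lt _ h) (by omega)
    rw [hsplit, List.flatMap_append, List.flatMap_append]
    rw [pv_insertBy_append _ x _ _ (by
      intro y hy
      rcases List.mem_flatMap.mp hy with ⟨c, hc, hyc⟩
      have h2 : y.2 = c := by simpa using (List.mem_filter.mp hyc).2
      have := hu_ge c hc
      simp [h2]
      omega)]
    rw [pv_insertBy_front _ x _ (by
      intro y hy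
      rcases List.mem_flatMap.mp hy with ⟨c, hc, hyc⟩
      have h2 : y.2 = c := by simpa using (List.mem_filter.mp hyc).2
      have := hv_lt c hc
      simp [h2]
      omega)]
    rw [pv_flatMap_last_bucket x l u hu_pair hu_ge hx_u]
    have hvb : v.flatMap (fun c => (l ++ [x]).filter (fun p => p.2 == c)) =
        v.flatMap (fun c => l.filter (fun p => p.2 == c)) := by
      apply pv_flatMap_congr_mem
      intro c hc
      have hlt := hv_lt c hc
      have hne : (x.2 == c) = false := beq_eq_false_iff_ne.mpr (by omega)
      simp [List.filter_append, hne]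
    rw [hvb]
    simp

-- map commutes with Python's one-sided slice
theorem pv_map_slice {α β : Type} (f : α → β) (xs : List α) (t : Int) :
    (PySem.List.slice xs none (some t)).map f = PySem.List.slice (xs.map f) none (some t) := by
  simp [PySem.List.slice, List.map_take]

-- the distinct counts of a dict, sorted descending, are strictly descending and cover the items
theorem pv_counts_pairwise (d : PySem.Dict String Int) :
    (PySem.List.sorted (PySem.Set.ofList d.values) (fun c => c) true).Pairwise (· > ·) := by
  have h1 := PySem.List.sorted_pairwise_rev (PySem.Set.ofList d.values) (fun c => c)
  have h2 : (PySem.List.sorted (PySem.Set.ofList d.values) (fun c => c) true).Nodup :=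
    ((PySem.List.sorted_perm (PySem.Set.ofList d.values) (fun c => c) true).nodup_iff).mpr
      (PySem.Set.nodup_ofList _)
  exact (h1.and h2).imp (by rintro a b ⟨hle, hne⟩; omega)

-- per-document equality: A's sorted-and-sliced word list is B's bucket pass, sliced
theorem pv_doc_eq (d : PySem.Dict String Int) (top_n : Int) :
    (PySem.List.slice (PySem.List.sorted d.items (fun x => x.2) true) none (some top_n)).map
        (fun w => w.1) =
      PySem.List.slice
        ((PySem.List.sorted (PySem.Set.ofList d.values) (fun c => c) true).foldl
          (fun acc c =>
            d.items.foldl (fun acc2 p => if p.2 == c then acc2 ++ [p.1] else acc2) acc)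
          []) none (some top_n) := by
  have hcover : ∀ p ∈ d.items, p.2 ∈ PySem.List.sorted (PySem.Set.ofList d.values) (fun c => c) true := by
    intro p hp
    rw [PySem.List.mem_sorted, PySem.Set.mem_ofList]
    exact List.mem_map.mpr ⟨p, hp, rfl⟩
  have hmain := pv_sorted_eq_buckets d.items _ (pv_counts_pairwise d) hcover
  have hfold :
      (PySem.List.sorted (PySem.Set.ofList d.values) (fun c => c) true).foldl
          (fun acc c =>
            d.items.foldl (fun acc2 p => if p.2 == c then acc2 ++ [p.1] else acc2) acc)
          [] =
        (PySem.List.sorted (PySem.Set.ofList d.values) (fun c => c) true).flatMap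
          (fun c => (d.items.filter (fun p => p.2 == c)).map (fun p => p.1)) := by
    calc (PySem.List.sorted (PySem.Set.ofList d.values) (fun c => c) true).foldl
          (fun acc c =>
            d.items.foldl (fun acc2 p => if p.2 == c then acc2 ++ [p.1] else acc2) acc) []
        = (PySem.List.sorted (PySem.Set.ofList d.values) (fun c => c) true).foldl
          (fun acc c => acc ++ (d.items.filter (fun p => p.2 == c)).map (fun p => p.1)) [] := by
          apply PySem.List.foldl_congr_mem
          intro acc c _
          exact PySem.List.foldl_append_if (fun p => p.2 == c) (fun p => p.1) d.items acc
      _ = _ := by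
          rw [PySem.List.foldl_append_eq_flatMap]
          simp
  rw [hfold, pv_map_slice, hmain, List.map_flatMap]

-- ===== VERDICT (by name: the statement is the Claim_ definition above) =====
theorem keywords_count_spec : Claim_equal_keywords_count := by
  intro corpus top_n _
  unfold Spec_keywords_count keywords_count keywords_count_alt
  rw [PySem.List.foldl_pyRange_zero_pyGetD corpus ""
    (fun key_words doc =>
      key_words ++
        [(PySem.List.slice
            (PySem.List.sorted
              (((PySem.Str.split? doc " ").getD []).foldl
                (fun d word => d.insert word (d.getD word 0 + 1)) (PySem.Dict.empty : PySem.Dict String Int)).items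
              (fun x => x.2) true) none (some top_n)).map (fun w => w.1)]) []]
  rw [PySem.List.foldl_append_singleton_eq_map, PySem.List.foldl_append_singleton_eq_map]
  simp only [List.nil_append]
  apply List.map_congr_left
  intro doc _
  exact pv_doc_eq _ top_n
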